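-- pv_equiv track=rewrite | github.com/kyamashiro/atcoder | abc251/abc251_b/main.py | solve
-- ===== SOURCE A (Python) =====
-- import itertools
--
-- def solve(N, W, A):
--     cnt = 0
--     arr = set()
--     for i in itertools.combinations(A, 1):
--         arr.add(sum(i))
--     for i in itertools.combinations(A, 2):
--         arr.add(sum(i))
--     for i in itertools.combinations(A, 3):
--         arr.add(sum(i))
--
--     for v in arr:
--         if v <= W:
--             cnt += 1
--
--     return cnt
-- ===== SOURCE B (Python) =====
-- def solve(N, W, A):
--     # Layered subset-sum DP: one left-to-right pass maintaining the sets of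
--     # sums of 1-, 2- and 3-element subsets of the prefix seen so far.
--     s1, s2, s3 = set(), set(), set()
--     for a in A:
--         s3 |= {a + v for v in s2}
--         s2 |= {a + v for v in s1}
--         s1.add(a)
--     return sum(1 for v in s1 | s2 | s3 if v <= W)
-- ===== Notes on version B (the rewrite author's own statement) =====
-- stated objective: faster
-- what changed: Replaces A's three independent enumerations of all 1-, 2- and 3-element combinations (summing every tuple) with a single-pass layered dynamic program that, for each new element, extends the already-deduplicated sets of smaller subset sums (s3 from s2, s2 from s1), then counts the union's elements that are <= W.
import Mathlib
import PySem

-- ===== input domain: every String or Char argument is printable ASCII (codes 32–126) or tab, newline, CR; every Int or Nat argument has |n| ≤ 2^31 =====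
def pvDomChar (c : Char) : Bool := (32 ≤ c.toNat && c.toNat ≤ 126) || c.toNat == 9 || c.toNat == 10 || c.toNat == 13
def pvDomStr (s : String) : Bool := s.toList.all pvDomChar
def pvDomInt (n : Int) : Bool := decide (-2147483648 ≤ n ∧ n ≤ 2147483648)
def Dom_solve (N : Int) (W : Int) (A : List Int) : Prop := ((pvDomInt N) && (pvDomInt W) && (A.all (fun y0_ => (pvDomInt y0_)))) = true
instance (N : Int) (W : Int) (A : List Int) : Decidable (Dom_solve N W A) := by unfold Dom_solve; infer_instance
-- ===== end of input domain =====

-- B replaces A's three independent combinations enumerations with one single-pass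
-- layered subset-sum DP (sets of 1-, 2-, 3-subset sums of the prefix); same result.

-- ===== PORT A =====
-- itertools.combinations(A, k) in Python's order, as the standard recursive generator
def combs : Nat → List Int → List (List Int)
  | 0, _ => [[]]
  | _ + 1, [] => []
  | k + 1, x :: xs => (combs k xs).map (fun c => x :: c) ++ combs (k + 1) xs

def solve (N : Int) (W : Int) (A : List Int) : Int :=
  let arr : PySem.Set Int := PySem.Set.empty
  let arr := (combs 1 A).foldl (fun s c => PySem.Set.add s c.sum) arr
  let arr := (combs 2 A).foldl (fun s c => PySem.Set.add s c.sum) arr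
  let arr := (combs 3 A).foldl (fun s c => PySem.Set.add s c.sum) arr
  arr.foldl (fun cnt v => if v ≤ W then cnt + 1 else cnt) 0

-- ===== PORT B =====
-- one loop iteration: s3 |= {a+v for v in s2}; s2 |= {a+v for v in s1}; s1.add(a)
def bStep (st : PySem.Set Int × PySem.Set Int × PySem.Set Int) (a : Int) :
    PySem.Set Int × PySem.Set Int × PySem.Set Int :=
  (PySem.Set.add st.1 a,
   PySem.Set.update st.2.1 (st.1.map (fun v => a + v)),
   PySem.Set.update st.2.2 (st.2.1.map (fun v => a + v)))

def solve_alt (N : Int) (W : Int) (A : List Int) : Int :=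
  let st := A.foldl bStep (PySem.Set.empty, PySem.Set.empty, PySem.Set.empty)
  (PySem.Set.union (PySem.Set.union st.1 st.2.1) st.2.2).foldl
    (fun cnt v => if v ≤ W then cnt + 1 else cnt) 0

-- ===== PRECONDITION & SPEC =====
def Spec_solve (N : Int) (W : Int) (A : List Int) (out : Int) : Prop := out = solve_alt N W A
instance (N : Int) (W : Int) (A : List Int) (out : Int) : Decidable (Spec_solve N W A out) := by unfold Spec_solve; infer_instance

-- ===== CLAIM (what is proved, stated in full; the proofs are below) =====
def Claim_equal_solve : Prop := ∀ (N : Int) (W : Int) (A : List Int), Dom_solve N W A → Spec_solve N W A (solve N W A)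

-- ===== LEMMAS AND PROOFS =====

theorem combs_zero (l : List Int) : combs 0 l = [[]] := by cases l <;> rfl

theorem combs_one (l : List Int) : combs 1 l = l.map (fun z => [z]) := by
  induction l with
  | nil => rfl
  | cons a xs ih => simp [combs, ih]

theorem mem_combs_snoc (k : Nat) (l : List Int) (a : Int) (c : List Int) :
    c ∈ combs (k+1) (l ++ [a]) ↔ c ∈ combs (k+1) l ∨ ∃ d ∈ combs k l, c = d ++ [a] := by
  induction l generalizing k c with
  | nil =>
    cases k with
    | zero => simp [combs]
    | succ k => simp [combs]
  | cons x l ih =>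
    cases k with
    | zero =>
      simp [combs_one, combs_zero]
      exact or_assoc.symm
    | succ k =>
      simp only [List.cons_append, combs, List.mem_append, List.mem_map, ih k, ih (k+1)]
      constructor
      · rintro (⟨d, (hd | ⟨e, he, rfl⟩), rfl⟩ | h | ⟨d, hd, rfl⟩)
        · exact Or.inl (Or.inl ⟨d, hd, rfl⟩)
        · exact Or.inr ⟨x :: e, Or.inl ⟨e, he, rfl⟩, rfl⟩
        · exact Or.inl (Or.inr h)
        · exact Or.inr ⟨d, Or.inr hd, rfl⟩
      · rintro ((⟨d, hd, rfl⟩ | h) | ⟨d, (⟨e, he, rfl⟩ | hd), rfl⟩)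
        · exact Or.inl ⟨d, Or.inl hd, rfl⟩
        · exact Or.inr (Or.inl h)
        · exact Or.inl ⟨e ++ [a], Or.inr ⟨e, he, rfl⟩, rfl⟩
        · exact Or.inr (Or.inr ⟨d, hd, rfl⟩)

-- membership invariant of B's DP fold
theorem mem_fold3 (l : List Int) :
    (∀ x, x ∈ (l.foldl bStep (PySem.Set.empty, PySem.Set.empty, PySem.Set.empty)).1 ↔
        ∃ c ∈ combs 1 l, x = c.sum) ∧
    (∀ x, x ∈ (l.foldl bStep (PySem.Set.empty, PySem.Set.empty, PySem.Set.empty)).2.1 ↔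
        ∃ c ∈ combs 2 l, x = c.sum) ∧
    (∀ x, x ∈ (l.foldl bStep (PySem.Set.empty, PySem.Set.empty, PySem.Set.empty)).2.2 ↔
        ∃ c ∈ combs 3 l, x = c.sum) := by
  induction l using List.reverseRecOn with
  | nil => simp [combs, PySem.Set.empty]
  | append_singleton l a ih =>
    obtain ⟨h1, h2, h3⟩ := ih
    rw [List.foldl_append]
    refine ⟨?_, ?_, ?_⟩
    · intro x
      simp only [List.foldl_cons, List.foldl_nil, bStep, PySem.Set.mem_add, h1,
        mem_combs_snoc 0, combs_zero]
      constructor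
      · rintro (⟨c, hc, rfl⟩ | rfl)
        · exact ⟨c, Or.inl hc, rfl⟩
        · exact ⟨_, Or.inr ⟨[], by simp, rfl⟩, by simp⟩
      · rintro ⟨c, (hc | ⟨d, hd, rfl⟩), rfl⟩
        · exact Or.inl ⟨c, hc, rfl⟩
        · simp at hd; subst hd; simp
    · intro x
      simp only [List.foldl_cons, List.foldl_nil, bStep, PySem.Set.mem_update,
        List.mem_map, h1, h2, mem_combs_snoc 1]
      constructor
      · rintro (⟨c, hc, rfl⟩ | ⟨v, ⟨c, hc, rfl⟩, rfl⟩)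
        · exact ⟨c, Or.inl hc, rfl⟩
        · exact ⟨c ++ [a], Or.inr ⟨c, hc, rfl⟩, by simp; ring⟩
      · rintro ⟨c, (hc | ⟨d, hd, rfl⟩), rfl⟩
        · exact Or.inl ⟨c, hc, rfl⟩
        · exact Or.inr ⟨d.sum, ⟨d, hd, rfl⟩, by simp; ring⟩
    · intro x
      simp only [List.foldl_cons, List.foldl_nil, bStep, PySem.Set.mem_update,
        List.mem_map, h2, h3, mem_combs_snoc 2]
      constructor
      · rintro (⟨c, hc, rfl⟩ | ⟨v, ⟨c, hc, rfl⟩, rfl⟩)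
        · exact ⟨c, Or.inl hc, rfl⟩
        · exact ⟨c ++ [a], Or.inr ⟨c, hc, rfl⟩, by simp; ring⟩
      · rintro ⟨c, (hc | ⟨d, hd, rfl⟩), rfl⟩
        · exact Or.inl ⟨c, hc, rfl⟩
        · exact Or.inr ⟨d.sum, ⟨d, hd, rfl⟩, by simp; ring⟩

theorem nodup_foldl_add {β : Type} (l : List β) (f : β → Int) (s : PySem.Set Int) (h : s.Nodup) :
    (l.foldl (fun s b => PySem.Set.add s (f b)) s).Nodup := by
  rw [← PySem.Set.update_map_eq_foldl_add]
  exact PySem.Set.nodup_update _ _ h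

theorem nodup_fold3 (l : List Int) :
    (l.foldl bStep (PySem.Set.empty, PySem.Set.empty, PySem.Set.empty)).1.Nodup ∧
    (l.foldl bStep (PySem.Set.empty, PySem.Set.empty, PySem.Set.empty)).2.1.Nodup ∧
    (l.foldl bStep (PySem.Set.empty, PySem.Set.empty, PySem.Set.empty)).2.2.Nodup := by
  induction l using List.reverseRecOn with
  | nil => simp [PySem.Set.empty]
  | append_singleton l a ih =>
    obtain ⟨h1, h2, h3⟩ := ih
    rw [List.foldl_append]
    exact ⟨PySem.Set.nodup_add _ _ h1, PySem.Set.nodup_update _ _ h2, PySem.Set.nodup_update _ _ h3⟩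

theorem countle_perm (W : Int) {l l' : List Int} (h : l.Perm l') :
    l.foldl (fun cnt v => if v ≤ W then cnt + 1 else cnt) 0 =
    l'.foldl (fun cnt v => if v ≤ W then cnt + 1 else cnt) (0 : Int) := by
  haveI : RightCommutative (fun (cnt : Int) v => if v ≤ W then cnt + 1 else cnt) :=
    ⟨fun c x y => by split_ifs <;> ring⟩
  exact h.foldl_eq _

theorem solve_eq (N W : Int) (A : List Int) : solve N W A = solve_alt N W A := by
  unfold solve solve_alt
  apply countle_perm
  apply (List.perm_ext_iff_of_nodup ?_ ?_).2
  · intro x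
    obtain ⟨h1, h2, h3⟩ := mem_fold3 A
    rw [PySem.Set.mem_union, PySem.Set.mem_union, h1, h2, h3]
    simp only [PySem.Set.mem_foldl_add, PySem.Set.empty, List.not_mem_nil, false_or]
  · exact nodup_foldl_add _ _ _ (nodup_foldl_add _ _ _ (nodup_foldl_add _ _ _ List.nodup_nil))
  · obtain ⟨h1, h2, h3⟩ := nodup_fold3 A
    exact PySem.Set.nodup_union _ _ (PySem.Set.nodup_union _ _ h1)

-- ===== VERDICT (by name: the statement is the Claim_ definition above) =====
theorem solve_spec : Claim_equal_solve := by
  intro N W A _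
  exact solve_eq N W A
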